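-- pv_equiv track=rewrite | github.com/eyamil/BIMM-181 | 6. patterns pt. 2/60. inverse burrows wheeler.py | number_bwt_positions
-- ===== SOURCE A (Python) =====
-- def number_bwt_positions(bwt):
--     numbering_graph = {}
--     numbered_text = []
--     for pos in range(len(bwt)):
--         if bwt[pos] in numbering_graph:
--             numbering_graph[bwt[pos]] += 1
--         else:
--             numbering_graph[bwt[pos]] = 0
--         numbered_text.append((bwt[pos], numbering_graph[bwt[pos]]))
--     return(numbered_text)
-- ===== SOURCE B (Python) =====
-- def number_bwt_positions(bwt):
--     index = {}
--     for pos, ch in enumerate(bwt):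
--         index.setdefault(ch, []).append(pos)
--     result = [None] * len(bwt)
--     for ch, positions in index.items():
--         for rank, pos in enumerate(positions):
--             result[pos] = (ch, rank)
--     return result
-- ===== Notes on version B (the rewrite author's own statement) =====
-- stated objective: alternative
-- what changed: A streams once through the string keeping a mutable per-character occurrence counter and appending (char, count); B instead first builds an index dict mapping each character to the ascending list of its positions, then scatters into a preallocated result array: for each character it enumerates its position list and writes (char, rank) at each position.
import Mathlib
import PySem

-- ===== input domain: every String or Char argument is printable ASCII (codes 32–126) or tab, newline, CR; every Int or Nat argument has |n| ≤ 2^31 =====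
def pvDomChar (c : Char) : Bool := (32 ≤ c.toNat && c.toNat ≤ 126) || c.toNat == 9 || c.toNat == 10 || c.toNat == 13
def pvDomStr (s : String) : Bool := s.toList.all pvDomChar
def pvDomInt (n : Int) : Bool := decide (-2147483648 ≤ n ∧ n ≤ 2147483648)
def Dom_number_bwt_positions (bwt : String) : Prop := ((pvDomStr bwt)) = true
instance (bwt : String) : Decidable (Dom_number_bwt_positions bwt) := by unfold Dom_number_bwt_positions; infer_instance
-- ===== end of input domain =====

-- B replaces A's streaming counter-dict pass by an index-first scatter: build char → ascending
-- position list once, then write (char, rank) into a preallocated result at each position (alternative decomposition, same cost).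

-- ===== PORT A =====
def number_bwt_positions (bwt : String) : List (String × Int) :=
  ((PySem.List.pyRange 0 (PySem.Str.len bwt)).foldl
    (fun (st : PySem.Dict Char Int × List (String × Int)) pos =>
      let c := PySem.List.pyGetD bwt.toList pos ' '  -- bwt[pos]; pos ∈ range(len(bwt)) is always in range, the default is never used
      let g := if st.1.contains c then st.1.modify c 0 (· + 1) else st.1.insert c 0
      (g, st.2 ++ [(String.ofList [c], g.getD c 0)]))
    (PySem.Dict.empty, [])).2

-- ===== PORT B =====
-- index.setdefault(ch, []).append(pos) mutates the dict's list in place: on the association-list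
-- dict this is exactly Dict.modify ch [] (· ++ [pos]).
-- result = [None] * len(bwt): every slot is overwritten before return (each position of the string
-- occurs in exactly one position list), so the placeholder ("", 0) never survives; result[pos] = v
-- with pos a nonnegative in-range index is List.set pos.toNat v.
def number_bwt_positions_alt (bwt : String) : List (String × Int) :=
  let l := bwt.toList
  let index := (PySem.List.enumerate l 0).foldl
      (fun (d : PySem.Dict Char (List Int)) p => d.modify p.2 [] (· ++ [p.1])) PySem.Dict.empty
  index.items.foldl
    (fun res cp => (PySem.List.enumerate cp.2 0).foldl
        (fun res rp => res.set rp.2.toNat (String.ofList [cp.1], rp.1)) res)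
    (List.replicate l.length (("", 0) : String × Int))

-- ===== PRECONDITION & SPEC =====
def Spec_number_bwt_positions (bwt : String) (out : List (String × Int)) : Prop := out = number_bwt_positions_alt bwt
instance (bwt : String) (out : List (String × Int)) : Decidable (Spec_number_bwt_positions bwt out) := by unfold Spec_number_bwt_positions; infer_instance

-- ===== CLAIM (what is proved, stated in full; the proofs are below) =====
def Claim_equal_number_bwt_positions : Prop := ∀ (bwt : String), Dom_number_bwt_positions bwt → Spec_number_bwt_positions bwt (number_bwt_positions bwt)

-- ===== LEMMAS AND PROOFS =====

-- Common characterization: position i carries (bwt[i], count of bwt[i] in bwt[:i]).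
def pvSpec (l : List Char) : List (String × Int) :=
  (PySem.List.enumerate l 0).map (fun p =>
    (String.ofList [p.2], ((l.take p.1.toNat).count p.2 : Int)))

-- ---------- A-side: the streaming counter loop computes pvSpec ----------

def pvStepD (d : PySem.Dict Char Int) (c : Char) : PySem.Dict Char Int :=
  if d.contains c then d.modify c 0 (· + 1) else d.insert c 0

def pvStepA (st : PySem.Dict Char Int × List (String × Int)) (c : Char) :
    PySem.Dict Char Int × List (String × Int) :=
  let g := pvStepD st.1 c
  (g, st.2 ++ [(String.ofList [c], g.getD c 0)])

lemma pvContains (l : List Char) (c : Char) :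
    (l.foldl pvStepD PySem.Dict.empty).contains c = true ↔ c ∈ l := by
  induction l using List.reverseRecOn with
  | nil => simp [pysem, PySem.Dict.empty, PySem.Dict.contains]
  | append_singleton ys y ih =>
    rw [List.foldl_append]
    simp only [List.foldl_cons, List.foldl_nil]
    rw [pvStepD]
    split_ifs with h
    · rw [PySem.Dict.contains_modify]
      simp [ih, or_comm]
    · rw [PySem.Dict.contains_insert]
      simp [ih, or_comm]

lemma pvGetD (l : List Char) (c : Char) (h : c ∈ l) :
    (l.foldl pvStepD PySem.Dict.empty).getD c 0 = (l.count c : Int) - 1 := by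
  induction l using List.reverseRecOn with
  | nil => cases h
  | append_singleton ys y ih =>
    rw [List.foldl_append]
    simp only [List.foldl_cons, List.foldl_nil]
    rw [pvStepD]
    by_cases hcy : c = y
    · subst hcy
      split_ifs with hc
      · have hmem : c ∈ ys := (pvContains ys c).1 hc
        rw [PySem.Dict.getD_modify_self, ih hmem]
        simp [List.count_append]
      · have hmem : c ∉ ys := fun hm => hc ((pvContains ys c).2 hm)
        rw [PySem.Dict.getD_insert_self]
        simp [List.count_append, List.count_eq_zero.2 hmem]
    · have hmem : c ∈ ys := by
        rcases List.mem_append.1 h with h' | h'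
        · exact h'
        · exact absurd (List.mem_singleton.1 h') hcy
      split_ifs with hc
      · rw [PySem.Dict.getD_modify_of_ne _ _ _ hcy, ih hmem]
        simp [List.count_append, List.count_singleton]
        exact fun h' => hcy h'.symm
      · rw [PySem.Dict.getD_insert_of_ne _ _ _ hcy, ih hmem]
        simp [List.count_append, List.count_singleton]
        exact fun h' => hcy h'.symm

lemma pvSpec_append (ys : List Char) (y : Char) :
    pvSpec (ys ++ [y]) = pvSpec ys ++ [(String.ofList [y], (ys.count y : Int))] := by
  unfold pvSpec
  rw [PySem.List.enumerate_append, List.map_append]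
  congr 1
  · apply List.map_congr_left
    intro p hp
    obtain ⟨k, hk, rfl⟩ := (PySem.List.mem_enumerate_iff ys 0 p).1 hp
    have h1 : ((0 : Int) + (k : Int)).toNat = k := by omega
    simp only [h1]
    rw [List.take_append_of_le_length (by omega)]
  · simp only [PySem.List.enumerate_cons, PySem.List.enumerate_nil, List.map_cons, List.map_nil]
    have h1 : ((0 : Int) + (ys.length : Int)).toNat = ys.length := by omega
    simp only [h1]
    rw [List.take_append_of_le_length (le_refl _), List.take_length]

lemma pvPair (l : List Char) :
    l.foldl pvStepA (PySem.Dict.empty, ([] : List (String × Int)))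
      = (l.foldl pvStepD PySem.Dict.empty, pvSpec l) := by
  induction l using List.reverseRecOn with
  | nil => simp [pvSpec, PySem.List.enumerate_nil]
  | append_singleton ys y ih =>
    rw [List.foldl_append, List.foldl_append]
    simp only [List.foldl_cons, List.foldl_nil, ih]
    have hg : (pvStepD (ys.foldl pvStepD PySem.Dict.empty) y).getD y 0 = (ys.count y : Int) := by
      by_cases hy : y ∈ ys
      · rw [pvStepD]
        rw [if_pos ((pvContains ys y).2 hy), PySem.Dict.getD_modify_self, pvGetD ys y hy]
        have hpos : 0 < ys.count y := List.count_pos_iff.2 hy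
        omega
      · rw [pvStepD]
        rw [if_neg (fun hc => hy ((pvContains ys y).1 hc)), PySem.Dict.getD_insert_self]
        simp [List.count_eq_zero.2 hy]
    simp only [pvStepA, hg, pvSpec_append]

-- ---------- B-side: the index-and-scatter passes compute pvSpec ----------

-- ascending list of the positions of c in l, as produced by the index-building pass
def pvP (c : Char) (l : List Char) : List Int :=
  ((PySem.List.enumerate l 0).filter (fun p => p.2 == c)).map (·.1)

-- the full write list of the scatter pass: (position, value written there)
def pvW (l : List Char) : List (Int × (String × Int)) :=
  (PySem.Set.ofList l).flatMap (fun c =>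
    (PySem.List.enumerate (pvP c l) 0).map (fun rp => (rp.2, (String.ofList [c], rp.1))))

def pvSet (r : List (String × Int)) (w : Int × (String × Int)) : List (String × Int) :=
  r.set w.1.toNat w.2

lemma pvLenScatter (W : List (Int × (String × Int))) (r : List (String × Int)) :
    (W.foldl pvSet r).length = r.length := by
  induction W generalizing r with
  | nil => rfl
  | cons w rest ih => simp [List.foldl_cons, ih, pvSet]

lemma pvScatterGet (W : List (Int × (String × Int))) (r : List (String × Int))
    (hnn : ∀ w ∈ W, 0 ≤ w.1) (hlt : ∀ w ∈ W, w.1.toNat < r.length)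
    (hnd : (W.map (·.1)).Nodup) (i : Nat) :
    (W.foldl pvSet r)[i]? =
      match W.find? (fun w => w.1 == (i : Int)) with
      | some w => some w.2
      | none => r[i]? := by
  induction W generalizing r with
  | nil => simp
  | cons w rest ih =>
    simp only [List.foldl_cons, List.find?_cons, pvSet]
    have hlen : (r.set w.1.toNat w.2).length = r.length := by simp
    by_cases hw : w.1 = (i : Int)
    · have hbeq : (w.1 == (i : Int)) = true := by simp [hw]
      rw [hbeq]
      have hrest : rest.find? (fun w' => w'.1 == (i : Int)) = none := by
        rw [List.find?_eq_none]
        intro w' hw'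
        have : w.1 ∉ rest.map (·.1) := by
          have := hnd
          simp only [List.map_cons, List.nodup_cons] at this
          exact this.1
        simp only [beq_iff_eq]
        intro hcon
        exact this (by rw [hw, ← hcon]; exact List.mem_map_of_mem hw')
      rw [ih (r.set w.1.toNat w.2)
          (fun w' h => hnn w' (List.mem_cons_of_mem _ h))
          (fun w' h => by rw [hlen]; exact hlt w' (List.mem_cons_of_mem _ h))
          (by simpa using (List.nodup_cons.1 (by simpa using hnd)).2), hrest]
      have hi : w.1.toNat = i := by
        have := hnn w (List.mem_cons_self)
        omega
      rw [hi]
      exact List.getElem?_set_self (by rw [← hi]; exact hlt w List.mem_cons_self)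
    · have hbeq : (w.1 == (i : Int)) = false := by simp [hw]
      rw [hbeq]
      rw [ih (r.set w.1.toNat w.2)
          (fun w' h => hnn w' (List.mem_cons_of_mem _ h))
          (fun w' h => by rw [hlen]; exact hlt w' (List.mem_cons_of_mem _ h))
          (by simpa using (List.nodup_cons.1 (by simpa using hnd)).2)]
      cases hfind : rest.find? (fun w' => w'.1 == (i : Int)) with
      | some w' => rfl
      | none =>
        have hne : w.1.toNat ≠ i := by
          have := hnn w List.mem_cons_self
          omega
        exact List.getElem?_set_ne hne

lemma pvFindOfNodup (W : List (Int × (String × Int))) (hnd : (W.map (·.1)).Nodup)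
    (i : Int) (v : String × Int) (hmem : (i, v) ∈ W) :
    W.find? (fun w => w.1 == i) = some (i, v) := by
  induction W with
  | nil => cases hmem
  | cons w rest ih =>
    simp only [List.map_cons, List.nodup_cons] at hnd
    rw [List.find?_cons]
    by_cases hw : w.1 = i
    · have hbeq : (w.1 == i) = true := by simp [hw]
      rw [hbeq]
      rcases List.mem_cons.1 hmem with h | h
      · subst h; rfl
      · exact absurd (by rw [hw]; exact List.mem_map_of_mem h) hnd.1
    · have hbeq : (w.1 == i) = false := by simp [hw]
      rw [hbeq]
      rcases List.mem_cons.1 hmem with h | h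
      · exact absurd (congrArg Prod.fst h.symm) hw
      · exact ih hnd.2 h

-- membership in pvP: every element is a valid position of c
lemma pvMemP (c : Char) (l : List Char) (j : Int) (hj : j ∈ pvP c l) :
    ∃ (k : Nat) (h : k < l.length), j = (k : Int) ∧ l[k] = c := by
  unfold pvP at hj
  obtain ⟨p, hp, rfl⟩ := List.mem_map.1 hj
  have hp2 := List.of_mem_filter hp
  obtain ⟨k, hk, rfl⟩ := (PySem.List.mem_enumerate_iff l 0 p).1 (List.mem_of_mem_filter hp)
  exact ⟨k, hk, by omega, by simpa using hp2⟩

lemma pvP_nodup (c : Char) (l : List Char) : (pvP c l).Nodup := by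
  unfold pvP
  have h1 := PySem.List.pairwise_lt_enumerate l 0
  have h2 := h1.filter (fun p => p.2 == c)
  have h3 : (((PySem.List.enumerate l 0).filter (fun p => p.2 == c)).map (·.1)).Pairwise (· < ·) :=
    List.pairwise_map.2 h2
  exact h3.imp (fun h => ne_of_lt h)

lemma pvP_append (c : Char) (ys : List Char) (y : Char) :
    pvP c (ys ++ [y]) = pvP c ys ++ (if y == c then [(ys.length : Int)] else []) := by
  unfold pvP
  rw [PySem.List.enumerate_append, List.filter_append, List.map_append]
  congr 1
  simp only [PySem.List.enumerate_cons, PySem.List.enumerate_nil]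
  by_cases h : y == c
  · simp [h]
  · simp [h]

lemma pvP_len (c : Char) (l : List Char) : (pvP c l).length = l.count c := by
  induction l using List.reverseRecOn with
  | nil => simp [pvP, PySem.List.enumerate_nil]
  | append_singleton ys y ih =>
    rw [pvP_append]
    by_cases h : y = c
    · simp [h, List.count_append, ih]
    · simp [h, List.count_append, ih]

-- the key indexing fact: position i sits at index (l.take i).count l[i] of its character's list
lemma pvP_getElem (l : List Char) (i : Nat) (hi : i < l.length) :
    (pvP l[i] l)[(l.take i).count l[i]]? = some (i : Int) := by
  induction l using List.reverseRecOn with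
  | nil => simp at hi
  | append_singleton ys y ih =>
    by_cases hlt : i < ys.length
    · have hget : (ys ++ [y])[i] = ys[i] := List.getElem_append_left hlt
      rw [hget]
      rw [pvP_append]
      have htake : (ys ++ [y]).take i = ys.take i := List.take_append_of_le_length (by omega)
      rw [htake]
      have hcnt : (ys.take i).count ys[i] < (pvP ys[i] ys).length := by
        rw [pvP_len]
        have h0 : ys[i] ∈ ys.drop i := by
          rw [List.mem_iff_getElem]
          refine ⟨0, by simp; omega, by simp⟩
        have h1 : (ys.take i ++ ys.drop i).count ys[i]
            = (ys.take i).count ys[i] + (ys.drop i).count ys[i] := by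
          rw [List.count_append]
        have h2 : (ys.take i ++ ys.drop i).count ys[i] = ys.count ys[i] := by
          rw [List.take_append_drop]
        have h3 : 0 < (ys.drop i).count ys[i] := List.count_pos_iff.2 h0
        omega
      rw [List.getElem?_append_left hcnt]
      exact ih hlt
    · have hieq : i = ys.length := by
        simp only [List.length_append, List.length_singleton] at hi
        omega
      subst hieq
      have hget : (ys ++ [y])[ys.length] = y := by
        rw [List.getElem_append_right (le_refl _)]
        simp
      rw [hget, pvP_append]
      simp only [beq_self_eq_true, if_true]
      have htake : (ys ++ [y]).take ys.length = ys := by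
        rw [List.take_append_of_le_length (le_refl _), List.take_length]
      rw [htake]
      have hlen : (pvP y ys).length = ys.count y := pvP_len y ys
      rw [List.getElem?_append_right (by omega)]
      simp [hlen]

-- facts about the write list
lemma pvW_fst (l : List Char) :
    (pvW l).map (·.1) = (PySem.Set.ofList l).flatMap (fun c => pvP c l) := by
  unfold pvW
  rw [List.map_flatMap]
  apply List.flatMap_congr  -- pointwise
  intro c _
  rw [List.map_map]
  have : ((fun p : Int × (String × Int) => p.1) ∘
      (fun rp : Int × Int => (rp.2, (String.ofList [c], rp.1)))) = (fun rp : Int × Int => rp.2) := rfl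
  rw [this]
  exact PySem.List.map_snd_enumerate _ _

lemma pvW_fst_nodup (l : List Char) : ((pvW l).map (·.1)).Nodup := by
  rw [pvW_fst]
  apply List.nodup_flatMap.2
  constructor
  · exact fun c _ => pvP_nodup c l
  · have hnd : (PySem.Set.ofList l).Nodup := PySem.Set.nodup_ofList l
    apply hnd.imp
    intro c c' hne
    rw [Function.onFun, List.disjoint_left]
    intro j hj hj'
    obtain ⟨k, hk, hje, hc⟩ := pvMemP c l j hj
    obtain ⟨k', hk', hje', hc'⟩ := pvMemP c' l j hj'
    have : k = k' := by omega
    exact hne (by rw [← hc, ← hc']; congr 1)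

lemma pvW_bounds (l : List Char) (w : Int × (String × Int)) (hw : w ∈ pvW l) :
    0 ≤ w.1 ∧ w.1.toNat < l.length := by
  unfold pvW at hw
  obtain ⟨c, _, hw2⟩ := List.mem_flatMap.1 hw
  obtain ⟨rp, hrp, rfl⟩ := List.mem_map.1 hw2
  obtain ⟨k, hk, rfl⟩ := (PySem.List.mem_enumerate_iff _ 0 rp).1 hrp
  have hmem : (pvP c l)[k] ∈ pvP c l := List.getElem_mem hk
  obtain ⟨m, hm, heq, _⟩ := pvMemP c l _ hmem
  simp only []
  constructor
  · simp [heq]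
  · simp [heq]; omega

lemma pvW_mem (l : List Char) (i : Nat) (hi : i < l.length) :
    ((i : Int), (String.ofList [l[i]], ((l.take i).count l[i] : Int))) ∈ pvW l := by
  unfold pvW
  apply List.mem_flatMap.2
  refine ⟨l[i], (PySem.Set.mem_ofList _ _).2 (List.getElem_mem hi), ?_⟩
  apply List.mem_map.2
  have hcnt : (l.take i).count l[i] < (pvP l[i] l).length :=
    (List.getElem?_eq_some_iff.1 (pvP_getElem l i hi)).1
  refine ⟨((((l.take i).count l[i] : Nat) : Int), (i : Int)), ?_, rfl⟩
  apply (PySem.List.mem_enumerate_iff _ 0 _).2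
  refine ⟨(l.take i).count l[i], hcnt, ?_⟩
  have := pvP_getElem l i hi
  rw [List.getElem?_eq_getElem hcnt] at this
  simp only [Option.some_inj] at this
  rw [this]
  norm_num

-- pvSpec, pointwise
lemma pvSpec_length (l : List Char) : (pvSpec l).length = l.length := by
  simp [pvSpec, PySem.List.length_enumerate]

lemma pvSpec_getElem (l : List Char) (i : Nat) (hi : i < l.length) :
    (pvSpec l)[i]? = some (String.ofList [l[i]], ((l.take i).count l[i] : Int)) := by
  unfold pvSpec
  rw [List.getElem?_map]
  rw [List.getElem?_eq_getElem (by rw [PySem.List.length_enumerate]; exact hi)]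
  rw [PySem.List.getElem_enumerate]
  have h0 : ((0 : Int) + (i : Int)).toNat = i := by omega
  simp only [Option.map_some, h0]

lemma pvFoldlFlatMap {α β σ : Type} (l : List α) (f : α → List β) (g : σ → β → σ) (s : σ) :
    (l.flatMap f).foldl g s = l.foldl (fun s x => (f x).foldl g s) s := by
  induction l generalizing s with
  | nil => rfl
  | cons x xs ih => simp [List.flatMap_cons, List.foldl_append, ih]

-- the index-building pass produces exactly (c, positions of c) for each distinct c
lemma pvItems (l : List Char) :
    ((PySem.List.enumerate l 0).foldl
      (fun (d : PySem.Dict Char (List Int)) p => d.modify p.2 [] (· ++ [p.1]))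
      PySem.Dict.empty).items
    = (PySem.Set.ofList l).map (fun c => (c, pvP c l)) := by
  set d := (PySem.List.enumerate l 0).foldl
      (fun (d : PySem.Dict Char (List Int)) p => d.modify p.2 [] (· ++ [p.1]))
      PySem.Dict.empty with hd
  have hkeys : d.keys = PySem.Set.ofList l := by
    rw [hd, PySem.Dict.keys_foldl_modify_key]
    rw [PySem.List.map_snd_enumerate, PySem.Dict.keys_empty, PySem.Set.update_nil_left]
  have hnd : d.keys.Nodup := by
    rw [hd]
    exact PySem.Dict.nodup_keys_foldl_modify_key _ _ _ _ _ (by simp [PySem.Dict.keys_empty])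
  have hget : ∀ c, d.getD c [] = pvP c l := by
    intro c
    rw [hd]
    show (List.foldl (fun (d : PySem.Dict Char (List Int)) (p : Int × Char) =>
        (fun (d : PySem.Dict Char (List Int)) (q : Char × Int) => d.modify q.1 [] (· ++ [q.2])) d (Prod.swap p))
        PySem.Dict.empty (PySem.List.enumerate l 0)).getD c [] = pvP c l
    have h1 := List.foldl_map (f := Prod.swap)
      (g := fun (d : PySem.Dict Char (List Int)) (q : Char × Int) => d.modify q.1 [] (· ++ [q.2]))
      (l := PySem.List.enumerate l 0) (init := PySem.Dict.empty)
    rw [← h1, PySem.Dict.getD_foldl_modify_append]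
    rw [PySem.Dict.getD_empty, List.nil_append]
    rw [List.filter_map]
    rw [List.map_map]
    rfl
  rw [PySem.Dict.items_eq_map_keys d hnd [], hkeys]
  apply List.map_congr_left
  intro c _
  rw [hget c]

-- B equals its write-list form
lemma pvAltEq (bwt : String) :
    number_bwt_positions_alt bwt
      = (pvW bwt.toList).foldl pvSet
          (List.replicate bwt.toList.length (("", 0) : String × Int)) := by
  show (((PySem.List.enumerate bwt.toList 0).foldl
      (fun (d : PySem.Dict Char (List Int)) p => d.modify p.2 [] (· ++ [p.1]))
      PySem.Dict.empty).items).foldl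
    (fun res cp => (PySem.List.enumerate cp.2 0).foldl
        (fun res rp => res.set rp.2.toNat (String.ofList [cp.1], rp.1)) res)
    (List.replicate bwt.toList.length (("", 0) : String × Int))
    = _
  rw [pvItems]
  rw [show pvW bwt.toList = (PySem.Set.ofList bwt.toList).flatMap (fun c =>
      (PySem.List.enumerate (pvP c bwt.toList) 0).map
        (fun rp => (rp.2, (String.ofList [c], rp.1)))) from rfl,
    pvFoldlFlatMap]
  have h2 := List.foldl_map (f := fun c => (c, pvP c bwt.toList))
    (g := fun (res : List (String × Int)) (cp : Char × List Int) =>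
      (PySem.List.enumerate cp.2 0).foldl
        (fun res rp => res.set rp.2.toNat (String.ofList [cp.1], rp.1)) res)
    (l := PySem.Set.ofList bwt.toList)
    (init := List.replicate bwt.toList.length (("", 0) : String × Int))
  rw [h2]
  have h3 : (fun (res : List (String × Int)) (c : Char) =>
        ((PySem.List.enumerate (pvP c bwt.toList) 0).map
          (fun rp => (rp.2, (String.ofList [c], rp.1)))).foldl pvSet res)
      = (fun (res : List (String × Int)) (c : Char) =>
        (PySem.List.enumerate (pvP c bwt.toList) 0).foldl
          (fun res rp => res.set rp.2.toNat (String.ofList [c], rp.1)) res) := by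
    funext res c
    rw [List.foldl_map]
    rfl
  rw [h3]

-- B computes pvSpec
lemma pvAltSpec (bwt : String) : number_bwt_positions_alt bwt = pvSpec bwt.toList := by
  rw [pvAltEq]
  set l := bwt.toList
  apply List.ext_getElem?
  intro i
  by_cases hi : i < l.length
  · rw [pvScatterGet (pvW l) _ (fun w hw => (pvW_bounds l w hw).1)
        (fun w hw => by rw [List.length_replicate]; exact (pvW_bounds l w hw).2)
        (pvW_fst_nodup l) i]
    rw [pvFindOfNodup (pvW l) (pvW_fst_nodup l) (i : Int)
        (String.ofList [l[i]], ((l.take i).count l[i] : Int)) (pvW_mem l i hi)]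
    rw [pvSpec_getElem l i hi]
  · rw [List.getElem?_eq_none, List.getElem?_eq_none]
    · rw [pvSpec_length]; omega
    · rw [pvLenScatter, List.length_replicate]; omega

-- ===== VERDICT (by name: the statement is the Claim_ definition above) =====
theorem number_bwt_positions_spec : Claim_equal_number_bwt_positions := by
  intro bwt _
  unfold Spec_number_bwt_positions
  have hA : number_bwt_positions bwt
      = ((PySem.List.pyRange 0 (PySem.Str.len bwt)).foldl
          (fun st pos => pvStepA st (PySem.List.pyGetD bwt.toList pos ' '))
          (PySem.Dict.empty, [])).2 := rfl
  rw [hA, PySem.Str.len_eq]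
  rw [show ((bwt.toList.length : Int)) = PySem.List.len bwt.toList from rfl]
  rw [PySem.List.foldl_pyRange_pyGetD bwt.toList ' ' pvStepA _ (by norm_num)]
  simp only [Int.toNat_zero, List.drop_zero]
  rw [pvPair, pvAltSpec]
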